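-- pv_equiv track=rewrite | github.com/mofaoss/SaaAutomataAcacia_back | app/modules/jigsaw/shards.py | _calculate_recycle_amounts
-- ===== SOURCE A (Python) =====
-- def _calculate_recycle_amounts(fragment_counts: list, min_retain: int) -> list:
--     recyclable = []
--     for count in fragment_counts:
--         if count >= min_retain:
--             recyclable.append(count - min_retain)
--         else:
--             recyclable.append(0)
--
--     total_recyclable = sum(recyclable)
--     actual_recycle = (total_recyclable // 5) * 5
--     new_recyclable = [0] * 8
--
--     if actual_recycle == 0:
--         return new_recyclable
--
--     remaining = actual_recycle
--     for i in range(8):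
--         if remaining <= 0:
--             break
--         take = min(recyclable[i], remaining)
--         new_recyclable[i] = take
--         remaining -= take
--
--     return new_recyclable
-- ===== SOURCE B (Python) =====
-- def _calculate_recycle_amounts(fragment_counts: list, min_retain: int) -> list:
--     recyclable = [max(0, c - min_retain) for c in fragment_counts]
--     actual_recycle = sum(recyclable) // 5 * 5
--     head = recyclable[:8]
--     prefixes = [sum(head[:i]) for i in range(len(head))]
--     out = [max(0, min(r, actual_recycle - p)) for r, p in zip(head, prefixes)]
--     return out + [0] * (8 - len(out))
-- ===== Notes on version B (the rewrite author's own statement) =====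
-- stated objective: alternative
-- what changed: The stateful greedy loop with a break that decrements `remaining` and writes into a preallocated [0]*8 is replaced by a closed per-slot formula over prefix sums: slot i gets max(0, min(recyclable[i], actual_recycle - sum(recyclable[:i]))), built by comprehensions and padded with zeros.
import Mathlib
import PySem

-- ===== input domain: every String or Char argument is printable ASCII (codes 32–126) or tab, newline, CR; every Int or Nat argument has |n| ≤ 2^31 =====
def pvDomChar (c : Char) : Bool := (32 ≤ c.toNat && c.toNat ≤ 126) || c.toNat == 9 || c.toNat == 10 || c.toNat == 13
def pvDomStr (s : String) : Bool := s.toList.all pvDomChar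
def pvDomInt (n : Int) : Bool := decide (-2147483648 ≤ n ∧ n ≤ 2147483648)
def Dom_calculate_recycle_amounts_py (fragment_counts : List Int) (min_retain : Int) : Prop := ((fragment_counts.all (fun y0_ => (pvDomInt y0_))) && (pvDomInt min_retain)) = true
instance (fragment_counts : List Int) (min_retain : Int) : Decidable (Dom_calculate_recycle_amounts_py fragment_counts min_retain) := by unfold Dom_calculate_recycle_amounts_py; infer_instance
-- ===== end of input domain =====

-- B replaces A's stateful greedy loop (break + decrementing `remaining` + index writes into [0]*8)
-- by a closed per-slot prefix-sum formula; objective: alternative decomposition, same cost.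


-- ===== PORT A =====
-- the `for i in range(8)` loop: fuel counts the remaining iterations, i is the Python index.
-- Python would raise IndexError in the `none` branch; that branch is unreachable
-- (actual_recycle ≤ sum recyclable), and the port simply stops there.
def paLoop (recyclable : List Int) : Nat → Int → Int → List Int → List Int
  | 0, _, _, new => new
  | fuel+1, i, remaining, new =>
    if remaining ≤ 0 then new
    else
      match PySem.List.pyGet? recyclable i with
      | none => new
      | some r =>
          paLoop recyclable fuel (i+1) (remaining - min r remaining)
            (new.set i.toNat (min r remaining))

def calculate_recycle_amounts_py (fragment_counts : List Int) (min_retain : Int) : List Int :=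
  let recyclable := fragment_counts.foldl
    (fun acc count => acc ++ [if count ≥ min_retain then count - min_retain else 0]) []
  let total_recyclable := recyclable.sum
  let actual_recycle := PySem.Int.floordiv total_recyclable 5 * 5
  let new_recyclable := List.replicate 8 (0 : Int)
  if actual_recycle = 0 then new_recyclable
  else paLoop recyclable 8 0 actual_recycle new_recyclable

-- ===== PORT B =====
def calculate_recycle_amounts_py_alt (fragment_counts : List Int) (min_retain : Int) : List Int :=
  let recyclable := fragment_counts.map (fun c => max 0 (c - min_retain))
  let actual_recycle := PySem.Int.floordiv recyclable.sum 5 * 5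
  let head := PySem.List.slice recyclable none (some 8)
  let prefixes := (List.range head.length).map
    (fun (i : Nat) => (PySem.List.slice head none (some (i : Int))).sum)
  let out := (head.zip prefixes).map (fun rp => max 0 (min rp.1 (actual_recycle - rp.2)))
  out ++ List.replicate (8 - out.length) 0

-- ===== PRECONDITION & SPEC =====
def Spec_calculate_recycle_amounts_py (fragment_counts : List Int) (min_retain : Int) (out : List Int) : Prop := out = calculate_recycle_amounts_py_alt fragment_counts min_retain
instance (fragment_counts : List Int) (min_retain : Int) (out : List Int) : Decidable (Spec_calculate_recycle_amounts_py fragment_counts min_retain out) := by unfold Spec_calculate_recycle_amounts_py; infer_instance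

-- ===== CLAIM (what is proved, stated in full; the proofs are below) =====
def Claim_equal_calculate_recycle_amounts_py : Prop := ∀ (fragment_counts : List Int) (min_retain : Int), Dom_calculate_recycle_amounts_py fragment_counts min_retain → Spec_calculate_recycle_amounts_py fragment_counts min_retain (calculate_recycle_amounts_py fragment_counts min_retain)

-- ===== LEMMAS AND PROOFS =====

-- greedy fill, written as structural recursion (common form of both ports)
def pvG : List Int → Int → List Int
  | [], _ => []
  | x :: xs, rem => max 0 (min x rem) :: pvG xs (rem - max 0 (min x rem))

-- B's per-slot prefix-sum formula
def pvF (xs : List Int) (rem : Int) : List Int :=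
  (xs.zip ((List.range xs.length).map (fun i => (xs.take i).sum))).map
    (fun rp => max 0 (min rp.1 (rem - rp.2)))

theorem pvG_length (xs : List Int) (rem : Int) : (pvG xs rem).length = xs.length := by
  induction xs generalizing rem with
  | nil => rfl
  | cons x xs ih => simp [pvG, ih]

theorem pvG_nonpos (xs : List Int) (rem : Int) (h : rem ≤ 0) :
    pvG xs rem = List.replicate xs.length 0 := by
  induction xs generalizing rem with
  | nil => rfl
  | cons x xs ih =>
    have h1 : max 0 (min x rem) = 0 := by omega
    simp [pvG, h1, List.replicate_succ, ih rem h]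

theorem pvF_cons (x : Int) (xs : List Int) (rem : Int) :
    pvF (x :: xs) rem = max 0 (min x rem) :: pvF xs (rem - x) := by
  simp only [pvF, List.length_cons, List.range_succ_eq_map, List.map_map, List.map_cons,
    List.take_zero, List.sum_nil, List.zip_cons_cons]
  congr 1
  · omega
  · have h1 : (List.range xs.length).map ((fun i => (List.take i (x :: xs)).sum) ∘ Nat.succ)
        = ((List.range xs.length).map (fun i => (List.take i xs).sum)).map (fun p => x + p) := by
      simp [Function.comp_def, List.map_map]
    rw [h1, List.zip_map_right, List.map_map]
    refine List.map_congr_left (fun rp _ => ?_)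
    cases rp with
    | mk a b => simp only [Function.comp_def, Prod.map, id]; omega

theorem pvF_nonpos (xs : List Int) (rem : Int) (h : rem ≤ 0) (hx : ∀ x ∈ xs, 0 ≤ x) :
    pvF xs rem = List.replicate xs.length 0 := by
  induction xs generalizing rem with
  | nil => rfl
  | cons x xs ih =>
    have hx0 : (0:Int) ≤ x := hx x (by simp)
    rw [pvF_cons]
    have h1 : max 0 (min x rem) = 0 := by omega
    rw [h1, ih (rem - x) (by omega) (fun y hy => hx y (by simp [hy]))]
    simp [List.replicate_succ]

theorem pvF_eq_pvG (xs : List Int) (rem : Int) (hx : ∀ x ∈ xs, 0 ≤ x) :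
    pvF xs rem = pvG xs rem := by
  induction xs generalizing rem with
  | nil => rfl
  | cons x xs ih =>
    have hx0 : (0:Int) ≤ x := hx x (by simp)
    have hxs : ∀ y ∈ xs, (0:Int) ≤ y := fun y hy => hx y (by simp [hy])
    rw [pvF_cons]
    show _ = max 0 (min x rem) :: pvG xs (rem - max 0 (min x rem))
    by_cases hc : x ≤ rem
    · have : max 0 (min x rem) = x := by omega
      rw [this, ih (rem - x) hxs]
    · -- rem < x : both residuals are ≤ 0
      have h1 : rem - x ≤ 0 := by omega
      have h2 : rem - max 0 (min x rem) ≤ 0 := by omega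
      rw [pvF_nonpos xs (rem - x) h1 hxs, pvG_nonpos xs _ h2]

-- A's loop computes the greedy fill, writing it over the zero suffix
theorem paLoop_eq (R : List Int) (hx : ∀ x ∈ R, 0 ≤ x) :
    ∀ (fuel : Nat) (pre : List Int) (rem : Int),
    paLoop R fuel (pre.length : Int) rem (pre ++ List.replicate fuel 0)
      = pre ++ pvG ((R.drop pre.length).take fuel) rem
          ++ List.replicate (fuel - ((R.drop pre.length).take fuel).length) 0 := by
  intro fuel
  induction fuel with
  | zero => intro pre rem; simp [paLoop, pvG]
  | succ fuel ih =>
    intro pre rem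
    rw [paLoop]
    by_cases hrem : rem ≤ 0
    · rw [if_pos hrem, pvG_nonpos _ _ hrem]
      have hlen : ((R.drop pre.length).take (fuel+1)).length ≤ fuel + 1 := by
        simp [List.length_take]
      rw [List.append_assoc, ← List.replicate_add]
      have : ((R.drop pre.length).take (fuel+1)).length + (fuel + 1 - ((R.drop pre.length).take (fuel+1)).length) = fuel + 1 := by omega
      rw [this]
    · rw [if_neg hrem]
      rw [PySem.List.pyGet?_natCast]
      by_cases hi : pre.length < R.length
      · have hsome : R[pre.length]? = some R[pre.length] := List.getElem?_eq_getElem hi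
        simp only [hsome]
        have hdrop : R.drop pre.length = R[pre.length] :: R.drop (pre.length + 1) :=
          List.drop_eq_getElem_cons hi
        set x := R[pre.length] with hxdef
        have hx0 : (0:Int) ≤ x := hx x (by exact List.getElem_mem hi)
        have hset : (pre ++ List.replicate (fuel+1) (0:Int)).set ((pre.length : Int)).toNat (min x rem)
            = (pre ++ [min x rem]) ++ List.replicate fuel 0 := by
          rw [List.replicate_succ, Int.toNat_natCast,
            List.set_append_right pre.length (min x rem) le_rfl]
          simp
        rw [hset]
        have hlen2 : ((pre ++ [min x rem]).length : Int) = (pre.length : Int) + 1 := by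
          simp
        rw [← hlen2, ih (pre ++ [min x rem]) (rem - min x rem)]
        have hdrop2 : R.drop (pre ++ [min x rem]).length = R.drop (pre.length + 1) := by
          simp
        rw [hdrop2, hdrop]
        have hmax : max 0 (min x rem) = min x rem := by omega
        simp only [List.take_succ_cons, pvG, hmax, List.length_cons, Nat.add_sub_add_right,
          List.append_assoc, List.cons_append, List.nil_append]
      · have hnone : R[pre.length]? = none := List.getElem?_eq_none (by omega)
        simp only [hnone]
        have hdrop : R.drop pre.length = [] := List.drop_eq_nil_of_le (by omega)
        simp [hdrop, pvG]

theorem recyclable_eq (fragment_counts : List Int) (min_retain : Int) :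
    fragment_counts.foldl
      (fun acc count => acc ++ [if count ≥ min_retain then count - min_retain else 0]) []
    = fragment_counts.map (fun c => max 0 (c - min_retain)) := by
  have key : ∀ (l : List Int) (acc : List Int),
      l.foldl (fun acc count => acc ++ [if count ≥ min_retain then count - min_retain else 0]) acc
        = acc ++ l.map (fun c => max 0 (c - min_retain)) := by
    intro l
    induction l with
    | nil => intro acc; simp
    | cons c l ih =>
      intro acc
      have : (if c ≥ min_retain then c - min_retain else 0) = max 0 (c - min_retain) := by
        split_ifs <;> omega
      simp [List.foldl_cons, ih, this]
  simpa using key fragment_counts []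

theorem slice_to_eight (xs : List Int) :
    PySem.List.slice xs none (some 8) = xs.take 8 := by
  have := PySem.List.slice_to_natCast xs 8
  simpa using this

-- ===== VERDICT (by name: the statement is the Claim_ definition above) =====
theorem calculate_recycle_amounts_py_spec : Claim_equal_calculate_recycle_amounts_py := by
  intro fragment_counts min_retain _
  show calculate_recycle_amounts_py fragment_counts min_retain
      = calculate_recycle_amounts_py_alt fragment_counts min_retain
  unfold calculate_recycle_amounts_py calculate_recycle_amounts_py_alt
  simp only [recyclable_eq, slice_to_eight, PySem.List.slice_to_natCast]
  generalize hgen : fragment_counts.map (fun c => max 0 (c - min_retain)) = R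
  have hx : ∀ x ∈ R, (0:Int) ≤ x := by
    intro x hxm
    rw [← hgen] at hxm
    obtain ⟨c, _, rfl⟩ := List.mem_map.mp hxm
    omega
  have hhead : ∀ x ∈ R.take 8, (0:Int) ≤ x := fun x hxm => hx x (List.mem_of_mem_take hxm)
  generalize PySem.Int.floordiv R.sum 5 * 5 = actual
  have hpvF : ((R.take 8).zip ((List.range (R.take 8).length).map
        (fun i => ((R.take 8).take i).sum))).map
        (fun rp => max 0 (min rp.1 (actual - rp.2))) = pvF (R.take 8) actual := rfl
  rw [hpvF, pvF_eq_pvG _ _ hhead, pvG_length]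
  by_cases hz : actual = 0
  · rw [if_pos hz, hz, pvG_nonpos _ _ le_rfl, ← List.replicate_add]
    have h8 := List.length_take_le 8 R
    congr 1
    omega
  · rw [if_neg hz]
    simpa using paLoop_eq R hx 8 [] actual
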